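-- pv_equiv track=rewrite | github.com/yoojt233/ForCT | Python/src/Programmers/월간_코드_챌린지_시즌3/공이동시뮬레이션/__init__.py | solution
-- ===== SOURCE A (Python) =====
-- def solution(n, m, x, y, queries):
--     op, ed = [x, y], [x, y]
--
--     for dir, dist in reversed(queries):
--         if dir == 0:
--             ed[1] = min(ed[1] + dist, m - 1)
--
--             if op[1] != 0: op[1] += dist
--         elif dir == 1:
--             op[1] = max(op[1] - dist, 0)
--
--             if ed[1] != m - 1: ed[1] -= dist
--         elif dir == 2:
--             ed[0] = min(ed[0] + dist, n - 1)
--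
--             if op[0] != 0: op[0] += dist
--         else:
--             op[0] = max(op[0] - dist, 0)
--
--             if ed[0] != n - 1: ed[0] -= dist
--
--         if op[0] > n - 1 or op[1] > m - 1 or ed[0] < 0 or ed[1] < 0: return 0
--
--     return (ed[0] - op[0] + 1) * (ed[1] - op[1] + 1)
-- ===== SOURCE B (Python) =====
-- def _trace(start, size, qs):
--     """States of one axis's feasible interval [op, ed] after each reverse move:
--     trace[k] is the interval once the last k moves of this axis are undone."""
--     op = ed = start
--     trace = [(op, ed)]
--     for grow, dist in reversed(qs):
--         if grow:
--             ed = min(ed + dist, size - 1)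
--             if op != 0:
--                 op += dist
--         else:
--             op = max(op - dist, 0)
--             if ed != size - 1:
--                 ed -= dist
--         trace.append((op, ed))
--     return trace
--
--
-- def solution(n, m, x, y, queries):
--     rows = [(d == 2, dist) for d, dist in queries if d not in (0, 1)]
--     cols = [(d == 0, dist) for d, dist in queries if d in (0, 1)]
--     rt = _trace(x, n, rows)
--     ct = _trace(y, m, cols)
--     # walk the schedule: after undoing each query, both intervals must be feasible
--     i = j = 0
--     for d, _ in reversed(queries):
--         if d in (0, 1):
--             j += 1
--         else:
--             i += 1
--         if rt[i][0] > n - 1 or rt[i][1] < 0 or ct[j][0] > m - 1 or ct[j][1] < 0: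
--             return 0
--     return (rt[i][1] - rt[i][0] + 1) * (ct[j][1] - ct[j][0] + 1)
-- ===== Notes on version B (the rewrite author's own statement) =====
-- stated objective: alternative
-- what changed: B is a two-phase algorithm: it partitions the queries into a row stream and a column stream, replays each axis independently recording its full interval trace without any early exit, and then scans the query schedule once to detect an infeasible intermediate configuration, whereas A runs a single early-exiting loop over a coupled four-field state with four direction branches.
import Mathlib
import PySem

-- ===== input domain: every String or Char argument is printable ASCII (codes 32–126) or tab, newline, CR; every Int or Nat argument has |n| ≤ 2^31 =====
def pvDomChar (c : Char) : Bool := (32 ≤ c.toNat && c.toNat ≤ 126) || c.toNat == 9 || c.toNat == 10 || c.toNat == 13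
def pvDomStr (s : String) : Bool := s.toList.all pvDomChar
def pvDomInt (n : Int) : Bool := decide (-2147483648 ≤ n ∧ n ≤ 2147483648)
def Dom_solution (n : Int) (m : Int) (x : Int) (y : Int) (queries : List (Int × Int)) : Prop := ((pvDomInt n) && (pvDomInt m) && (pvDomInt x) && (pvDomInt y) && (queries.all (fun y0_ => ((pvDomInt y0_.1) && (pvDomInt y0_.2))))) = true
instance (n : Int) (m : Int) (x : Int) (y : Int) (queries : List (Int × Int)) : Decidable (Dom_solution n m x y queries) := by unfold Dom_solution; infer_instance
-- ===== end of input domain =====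

-- B is a two-phase algorithm (per-axis interval traces, then one scan of the query
-- schedule) instead of A's single early-exiting loop over a coupled four-field state;
-- objective: alternative decomposition, same cost.

-- ===== PORT A =====
-- A's loop over reversed(queries) with state op=[op0,op1], ed=[ed0,ed1];
-- returning 0 inside the loop is the `0` branch here.
def aLoop (n : Int) (m : Int) (o0 : Int) (o1 : Int) (e0 : Int) (e1 : Int) :
    List (Int × Int) → Int
  | [] => (e0 - o0 + 1) * (e1 - o1 + 1)
  | (dir, dist) :: rest =>
    if dir = 0 then
      let e1' := min (e1 + dist) (m - 1)
      let o1' := if o1 ≠ 0 then o1 + dist else o1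
      if o0 > n - 1 ∨ o1' > m - 1 ∨ e0 < 0 ∨ e1' < 0 then 0
      else aLoop n m o0 o1' e0 e1' rest
    else if dir = 1 then
      let o1' := max (o1 - dist) 0
      let e1' := if e1 ≠ m - 1 then e1 - dist else e1
      if o0 > n - 1 ∨ o1' > m - 1 ∨ e0 < 0 ∨ e1' < 0 then 0
      else aLoop n m o0 o1' e0 e1' rest
    else if dir = 2 then
      let e0' := min (e0 + dist) (n - 1)
      let o0' := if o0 ≠ 0 then o0 + dist else o0
      if o0' > n - 1 ∨ o1 > m - 1 ∨ e0' < 0 ∨ e1 < 0 then 0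
      else aLoop n m o0' o1 e0' e1 rest
    else
      let o0' := max (o0 - dist) 0
      let e0' := if e0 ≠ n - 1 then e0 - dist else e0
      if o0' > n - 1 ∨ o1 > m - 1 ∨ e0' < 0 ∨ e1 < 0 then 0
      else aLoop n m o0' o1 e0' e1 rest

def solution (n : Int) (m : Int) (x : Int) (y : Int) (queries : List (Int × Int)) : Int :=
  aLoop n m x y x y queries.reverse

-- ===== PORT B =====
-- B's helper _trace: the loop over reversed(qs) appending the interval after each
-- move; here the same appended list built by structural recursion (head = current state)
def bTrace (size : Int) (op : Int) (ed : Int) : List (Bool × Int) → List (Int × Int)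
  | [] => [(op, ed)]
  | (grow, dist) :: rest =>
    if grow then
      (op, ed) :: bTrace size (if op ≠ 0 then op + dist else op) (min (ed + dist) (size - 1)) rest
    else
      (op, ed) :: bTrace size (max (op - dist) 0) (if ed ≠ size - 1 then ed - dist else ed) rest

def bIsCol (d : Int) : Bool := d == 0 || d == 1

-- Source B's rt[i] / ct[j]; the index is always in range, so the default is never used
def bGet (t : List (Int × Int)) (i : Int) : Int × Int := (PySem.List.pyGet? t i).getD (0, 0)

-- Source B's phase-2 loop over reversed(queries) with the two trace indices i, j
def bScan (n : Int) (m : Int) (rt : List (Int × Int)) (ct : List (Int × Int))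
    (i : Int) (j : Int) : List (Int × Int) → Int
  | [] => ((bGet rt i).2 - (bGet rt i).1 + 1) * ((bGet ct j).2 - (bGet ct j).1 + 1)
  | (d, _) :: rest =>
    if bIsCol d then
      if (bGet rt i).1 > n - 1 ∨ (bGet rt i).2 < 0 ∨
         (bGet ct (j + 1)).1 > m - 1 ∨ (bGet ct (j + 1)).2 < 0 then 0
      else bScan n m rt ct i (j + 1) rest
    else
      if (bGet rt (i + 1)).1 > n - 1 ∨ (bGet rt (i + 1)).2 < 0 ∨
         (bGet ct j).1 > m - 1 ∨ (bGet ct j).2 < 0 then 0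
      else bScan n m rt ct (i + 1) j rest

def solution_alt (n : Int) (m : Int) (x : Int) (y : Int) (queries : List (Int × Int)) : Int :=
  let rows := (queries.filter (fun q => !(bIsCol q.1))).map (fun q => (q.1 == 2, q.2))
  let cols := (queries.filter (fun q => bIsCol q.1)).map (fun q => (q.1 == 0, q.2))
  let rt := bTrace n x x rows.reverse
  let ct := bTrace m y y cols.reverse
  bScan n m rt ct 0 0 queries.reverse

-- ===== PRECONDITION & SPEC =====
def Spec_solution (n : Int) (m : Int) (x : Int) (y : Int) (queries : List (Int × Int)) (out : Int) : Prop := out = solution_alt n m x y queries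
instance (n : Int) (m : Int) (x : Int) (y : Int) (queries : List (Int × Int)) (out : Int) : Decidable (Spec_solution n m x y queries out) := by unfold Spec_solution; infer_instance

-- ===== CLAIM (what is proved, stated in full; the proofs are below) =====
def Claim_equal_solution : Prop := ∀ (n : Int) (m : Int) (x : Int) (y : Int) (queries : List (Int × Int)), Dom_solution n m x y queries → Spec_solution n m x y queries (solution n m x y queries)

-- ===== LEMMAS AND PROOFS =====

def pvRowf (l : List (Int × Int)) : List (Bool × Int) :=
  (l.filter (fun q => !(bIsCol q.1))).map (fun q => (q.1 == 2, q.2))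

def pvColf (l : List (Int × Int)) : List (Bool × Int) :=
  (l.filter (fun q => bIsCol q.1)).map (fun q => (q.1 == 0, q.2))

-- suffix-consuming reformulation of the phase-2 scan: the head of each remaining
-- trace is the current interval of that axis
def pvScan (n : Int) (m : Int) : List (Int × Int) → List (Int × Int) → List (Int × Int) → Int
  | rt, ct, [] =>
      ((rt.headD (0, 0)).2 - (rt.headD (0, 0)).1 + 1) *
      ((ct.headD (0, 0)).2 - (ct.headD (0, 0)).1 + 1)
  | rt, ct, (d, _) :: rest =>
    if bIsCol d then
      if (rt.headD (0, 0)).1 > n - 1 ∨ (rt.headD (0, 0)).2 < 0 ∨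
         (ct.tail.headD (0, 0)).1 > m - 1 ∨ (ct.tail.headD (0, 0)).2 < 0 then 0
      else pvScan n m rt ct.tail rest
    else
      if (rt.tail.headD (0, 0)).1 > n - 1 ∨ (rt.tail.headD (0, 0)).2 < 0 ∨
         (ct.headD (0, 0)).1 > m - 1 ∨ (ct.headD (0, 0)).2 < 0 then 0
      else pvScan n m rt.tail ct rest

lemma bTrace_headD (size op ed : Int) (l : List (Bool × Int)) :
    (bTrace size op ed l).headD (0, 0) = (op, ed) := by
  cases l with
  | nil => rfl
  | cons q rest => obtain ⟨grow, dist⟩ := q; cases grow <;> simp [bTrace]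

lemma bTrace_length (size op ed : Int) (l : List (Bool × Int)) :
    (bTrace size op ed l).length = l.length + 1 := by
  induction l generalizing op ed with
  | nil => rfl
  | cons q rest ih => obtain ⟨grow, dist⟩ := q; cases grow <;> simp [bTrace, ih]

lemma bGet_drop (t : List (Int × Int)) (k : Nat) (h : k < t.length) :
    bGet t (k : Int) = (t.drop k).headD (0, 0) := by
  simp [bGet, PySem.List.pyGet?_natCast, List.headD_eq_head?_getD, List.head?_drop,
    List.getElem?_eq_getElem h]

-- guarded one-step unfolding equations for the two scans
lemma bScan_cons_col (n m : Int) (rt ct : List (Int × Int)) (i j : Int)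
    (d dist : Int) (rest : List (Int × Int)) (hcol : bIsCol d = true) :
    bScan n m rt ct i j ((d, dist) :: rest) =
      (if (bGet rt i).1 > n - 1 ∨ (bGet rt i).2 < 0 ∨
          (bGet ct (j + 1)).1 > m - 1 ∨ (bGet ct (j + 1)).2 < 0 then 0
       else bScan n m rt ct i (j + 1) rest) := by
  simp [bScan, hcol]

lemma bScan_cons_row (n m : Int) (rt ct : List (Int × Int)) (i j : Int)
    (d dist : Int) (rest : List (Int × Int)) (hcol : bIsCol d = false) :
    bScan n m rt ct i j ((d, dist) :: rest) =
      (if (bGet rt (i + 1)).1 > n - 1 ∨ (bGet rt (i + 1)).2 < 0 ∨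
          (bGet ct j).1 > m - 1 ∨ (bGet ct j).2 < 0 then 0
       else bScan n m rt ct (i + 1) j rest) := by
  simp [bScan, hcol]

lemma pvScan_cons_col (n m : Int) (rt ct : List (Int × Int))
    (d dist : Int) (rest : List (Int × Int)) (hcol : bIsCol d = true) :
    pvScan n m rt ct ((d, dist) :: rest) =
      (if (rt.headD (0, 0)).1 > n - 1 ∨ (rt.headD (0, 0)).2 < 0 ∨
          (ct.tail.headD (0, 0)).1 > m - 1 ∨ (ct.tail.headD (0, 0)).2 < 0 then 0
       else pvScan n m rt ct.tail rest) := by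
  simp [pvScan, hcol]

lemma pvScan_cons_row (n m : Int) (rt ct : List (Int × Int))
    (d dist : Int) (rest : List (Int × Int)) (hcol : bIsCol d = false) :
    pvScan n m rt ct ((d, dist) :: rest) =
      (if (rt.tail.headD (0, 0)).1 > n - 1 ∨ (rt.tail.headD (0, 0)).2 < 0 ∨
          (ct.headD (0, 0)).1 > m - 1 ∨ (ct.headD (0, 0)).2 < 0 then 0
       else pvScan n m rt.tail ct rest) := by
  simp [pvScan, hcol]

-- index-based phase 2 equals the suffix-consuming scan
lemma bridge (n m : Int) : ∀ (l : List (Int × Int)) (rt ct : List (Int × Int)) (i j : Nat),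
    i + (l.filter (fun q => !(bIsCol q.1))).length + 1 ≤ rt.length →
    j + (l.filter (fun q => bIsCol q.1)).length + 1 ≤ ct.length →
    bScan n m rt ct (i : Int) (j : Int) l = pvScan n m (rt.drop i) (ct.drop j) l := by
  intro l
  induction l with
  | nil =>
    intro rt ct i j hr hc
    simp only [List.filter_nil, List.length_nil] at hr hc
    simp [bScan, pvScan, bGet_drop rt i (by omega), bGet_drop ct j (by omega)]
  | cons q rest ih =>
    intro rt ct i j hr hc
    obtain ⟨d, dist⟩ := q
    by_cases hcol : bIsCol d = true
    · simp [hcol] at hr hc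
      have hceq : ((j : Int) + 1) = ((j + 1 : Nat) : Int) := by push_cast; ring
      have h1 : bGet rt (i : Int) = (rt.drop i).headD (0, 0) := bGet_drop rt i (by omega)
      have h2 : bGet ct ((j : Int) + 1) = (ct.drop (j + 1)).headD (0, 0) := by
        rw [hceq]; exact bGet_drop ct (j + 1) (by omega)
      have h3 : (ct.drop j).tail = ct.drop (j + 1) := List.tail_drop ..
      rw [bScan_cons_col n m rt ct _ _ d dist rest hcol,
        pvScan_cons_col n m _ _ d dist rest hcol, h1, h2, h3]
      split_ifs with hbad
      · rfl
      · rw [hceq]; exact ih rt ct i (j + 1) (by omega) (by omega)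
    · replace hcol : bIsCol d = false := by simpa using hcol
      simp [hcol] at hr hc
      have hreq : ((i : Int) + 1) = ((i + 1 : Nat) : Int) := by push_cast; ring
      have h1 : bGet ct (j : Int) = (ct.drop j).headD (0, 0) := bGet_drop ct j (by omega)
      have h2 : bGet rt ((i : Int) + 1) = (rt.drop (i + 1)).headD (0, 0) := by
        rw [hreq]; exact bGet_drop rt (i + 1) (by omega)
      have h3 : (rt.drop i).tail = rt.drop (i + 1) := List.tail_drop ..
      rw [bScan_cons_row n m rt ct _ _ d dist rest hcol,
        pvScan_cons_row n m _ _ d dist rest hcol, h1, h2, h3]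
      split_ifs with hbad
      · rfl
      · rw [hreq]; exact ih rt ct (i + 1) j (by omega) (by omega)

-- one-step unfolding equations for A's loop (definitional)
lemma aLoop_cons0 (n m o0 o1 e0 e1 dist : Int) (rest : List (Int × Int)) :
    aLoop n m o0 o1 e0 e1 ((0, dist) :: rest) =
      (if o0 > n - 1 ∨ (if o1 ≠ 0 then o1 + dist else o1) > m - 1 ∨
          e0 < 0 ∨ min (e1 + dist) (m - 1) < 0 then 0
       else aLoop n m o0 (if o1 ≠ 0 then o1 + dist else o1) e0 (min (e1 + dist) (m - 1)) rest) := rfl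

lemma aLoop_cons1 (n m o0 o1 e0 e1 dist : Int) (rest : List (Int × Int)) :
    aLoop n m o0 o1 e0 e1 ((1, dist) :: rest) =
      (if o0 > n - 1 ∨ max (o1 - dist) 0 > m - 1 ∨
          e0 < 0 ∨ (if e1 ≠ m - 1 then e1 - dist else e1) < 0 then 0
       else aLoop n m o0 (max (o1 - dist) 0) e0 (if e1 ≠ m - 1 then e1 - dist else e1) rest) := rfl

lemma aLoop_cons2 (n m o0 o1 e0 e1 dist : Int) (rest : List (Int × Int)) :
    aLoop n m o0 o1 e0 e1 ((2, dist) :: rest) =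
      (if (if o0 ≠ 0 then o0 + dist else o0) > n - 1 ∨ o1 > m - 1 ∨
          min (e0 + dist) (n - 1) < 0 ∨ e1 < 0 then 0
       else aLoop n m (if o0 ≠ 0 then o0 + dist else o0) o1 (min (e0 + dist) (n - 1)) e1 rest) := rfl

lemma aLoop_consE (n m o0 o1 e0 e1 d dist : Int) (rest : List (Int × Int))
    (hd0 : ¬ d = 0) (hd1 : ¬ d = 1) (hd2 : ¬ d = 2) :
    aLoop n m o0 o1 e0 e1 ((d, dist) :: rest) =
      (if max (o0 - dist) 0 > n - 1 ∨ o1 > m - 1 ∨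
          (if e0 ≠ n - 1 then e0 - dist else e0) < 0 ∨ e1 < 0 then 0
       else aLoop n m (max (o0 - dist) 0) o1 (if e0 ≠ n - 1 then e0 - dist else e0) e1 rest) := by
  simp only [aLoop, if_neg hd0, if_neg hd1, if_neg hd2]

lemma bTrace_cons_true (size op ed dist : Int) (rest : List (Bool × Int)) :
    bTrace size op ed ((true, dist) :: rest) =
      (op, ed) :: bTrace size (if op ≠ 0 then op + dist else op) (min (ed + dist) (size - 1)) rest := rfl

lemma bTrace_cons_false (size op ed dist : Int) (rest : List (Bool × Int)) :
    bTrace size op ed ((false, dist) :: rest) =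
      (op, ed) :: bTrace size (max (op - dist) 0) (if ed ≠ size - 1 then ed - dist else ed) rest := rfl

-- the heart of the file: A's early-exiting coupled loop equals the suffix scan of
-- the two independently built axis traces (no validity hypotheses needed)
lemma decomp (n m : Int) : ∀ (l : List (Int × Int)) (o0 o1 e0 e1 : Int),
    aLoop n m o0 o1 e0 e1 l =
      pvScan n m (bTrace n o0 e0 (pvRowf l)) (bTrace m o1 e1 (pvColf l)) l := by
  intro l
  induction l with
  | nil =>
    intro o0 o1 e0 e1
    simp [aLoop, pvScan, pvRowf, pvColf, bTrace]
  | cons q rest ih =>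
    intro o0 o1 e0 e1
    obtain ⟨d, dist⟩ := q
    by_cases hc : bIsCol d = true
    · have hrowf : pvRowf ((d, dist) :: rest) = pvRowf rest := by simp [pvRowf, hc]
      have hcolf : pvColf ((d, dist) :: rest) = (d == 0, dist) :: pvColf rest := by
        simp [pvColf, hc]
      rw [hrowf, hcolf]
      rcases (by simpa [bIsCol] using hc : d = 0 ∨ d = 1) with hd | hd
      · subst hd
        rw [show ((0 : Int) == 0) = true from by decide, aLoop_cons0, bTrace_cons_true,
          pvScan_cons_col n m _ _ 0 dist rest hc]
        simp only [List.tail_cons, bTrace_headD]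
        by_cases hB : o0 > n - 1 ∨ e0 < 0 ∨
            (if o1 ≠ 0 then o1 + dist else o1) > m - 1 ∨ min (e1 + dist) (m - 1) < 0
        · have hA : o0 > n - 1 ∨ (if o1 ≠ 0 then o1 + dist else o1) > m - 1 ∨
              e0 < 0 ∨ min (e1 + dist) (m - 1) < 0 := by tauto
          rw [if_pos hA, if_pos hB]
        · have hA : ¬ (o0 > n - 1 ∨ (if o1 ≠ 0 then o1 + dist else o1) > m - 1 ∨
              e0 < 0 ∨ min (e1 + dist) (m - 1) < 0) := by tauto
          rw [if_neg hA, if_neg hB, ih]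
      · subst hd
        rw [show ((1 : Int) == 0) = false from by decide, aLoop_cons1, bTrace_cons_false,
          pvScan_cons_col n m _ _ 1 dist rest hc]
        simp only [List.tail_cons, bTrace_headD]
        by_cases hB : o0 > n - 1 ∨ e0 < 0 ∨
            max (o1 - dist) 0 > m - 1 ∨ (if e1 ≠ m - 1 then e1 - dist else e1) < 0
        · have hA : o0 > n - 1 ∨ max (o1 - dist) 0 > m - 1 ∨
              e0 < 0 ∨ (if e1 ≠ m - 1 then e1 - dist else e1) < 0 := by tauto
          rw [if_pos hA, if_pos hB]
        · have hA : ¬ (o0 > n - 1 ∨ max (o1 - dist) 0 > m - 1 ∨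
              e0 < 0 ∨ (if e1 ≠ m - 1 then e1 - dist else e1) < 0) := by tauto
          rw [if_neg hA, if_neg hB, ih]
    · have hd0 : ¬ (d = 0) := by intro h; subst h; simp [bIsCol] at hc
      have hd1 : ¬ (d = 1) := by intro h; subst h; simp [bIsCol] at hc
      have hrowf : pvRowf ((d, dist) :: rest) = (d == 2, dist) :: pvRowf rest := by
        simp [pvRowf, hc]
      have hcolf : pvColf ((d, dist) :: rest) = pvColf rest := by simp [pvColf, hc]
      rw [hrowf, hcolf]
      by_cases hd2 : d = 2
      · subst hd2
        rw [show ((2 : Int) == 2) = true from by decide, aLoop_cons2, bTrace_cons_true,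
          pvScan_cons_row n m _ _ 2 dist rest (by simpa using hc)]
        simp only [List.tail_cons, bTrace_headD]
        by_cases hB : (if o0 ≠ 0 then o0 + dist else o0) > n - 1 ∨
            min (e0 + dist) (n - 1) < 0 ∨ o1 > m - 1 ∨ e1 < 0
        · have hA : (if o0 ≠ 0 then o0 + dist else o0) > n - 1 ∨ o1 > m - 1 ∨
              min (e0 + dist) (n - 1) < 0 ∨ e1 < 0 := by tauto
          rw [if_pos hA, if_pos hB]
        · have hA : ¬ ((if o0 ≠ 0 then o0 + dist else o0) > n - 1 ∨ o1 > m - 1 ∨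
              min (e0 + dist) (n - 1) < 0 ∨ e1 < 0) := by tauto
          rw [if_neg hA, if_neg hB, ih]
      · rw [show (d == 2) = false from by simp [hd2],
          aLoop_consE n m o0 o1 e0 e1 d dist rest hd0 hd1 hd2, bTrace_cons_false,
          pvScan_cons_row n m _ _ d dist rest (by simpa using hc)]
        simp only [List.tail_cons, bTrace_headD]
        by_cases hB : max (o0 - dist) 0 > n - 1 ∨
            (if e0 ≠ n - 1 then e0 - dist else e0) < 0 ∨ o1 > m - 1 ∨ e1 < 0
        · have hA : max (o0 - dist) 0 > n - 1 ∨ o1 > m - 1 ∨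
              (if e0 ≠ n - 1 then e0 - dist else e0) < 0 ∨ e1 < 0 := by tauto
          rw [if_pos hA, if_pos hB]
        · have hA : ¬ (max (o0 - dist) 0 > n - 1 ∨ o1 > m - 1 ∨
              (if e0 ≠ n - 1 then e0 - dist else e0) < 0 ∨ e1 < 0) := by tauto
          rw [if_neg hA, if_neg hB, ih]

lemma rowf_reverse (queries : List (Int × Int)) :
    ((queries.filter (fun q => !(bIsCol q.1))).map (fun q => (q.1 == 2, q.2))).reverse =
      pvRowf queries.reverse := by
  simp [pvRowf, List.filter_reverse, List.map_reverse]

lemma colf_reverse (queries : List (Int × Int)) :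
    ((queries.filter (fun q => bIsCol q.1)).map (fun q => (q.1 == 0, q.2))).reverse =
      pvColf queries.reverse := by
  simp [pvColf, List.filter_reverse, List.map_reverse]

lemma solution_alt_eq (n m x y : Int) (queries : List (Int × Int)) :
    solution_alt n m x y queries =
      pvScan n m (bTrace n x x (pvRowf queries.reverse))
                 (bTrace m y y (pvColf queries.reverse)) queries.reverse := by
  show bScan n m _ _ 0 0 queries.reverse = _
  rw [rowf_reverse, colf_reverse,
    show (0 : Int) = ((0 : Nat) : Int) from rfl]
  rw [bridge n m queries.reverse _ _ 0 0
    (by simp [bTrace_length, pvRowf]) (by simp [bTrace_length, pvColf])]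
  simp

-- ===== VERDICT (by name: the statement is the Claim_ definition above) =====
theorem solution_spec : Claim_equal_solution := by
  intro n m x y queries _
  unfold Spec_solution
  rw [solution_alt_eq]
  exact decomp n m queries.reverse x y x y
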